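-- pv_equiv track=rewrite | github.com/NiRo-2/yolov8-toolkit | vlm_yolo_prep.py | match_label_to_class
-- ===== SOURCE A (Python) =====
-- def match_label_to_class(
--     raw_label:     str,
--     class_mapping: dict[str, int],
-- ) -> int | None:
--     """
--     Map the model's returned label to a YOLO class ID.
--
--     Strategy (in order):
--       1. Exact match (case-insensitive).
--       2. Substring match - class key is contained in label or vice-versa.
--          Handles slight paraphrasing like "a blue shirt" -> "blue shirt".
--       3. Return None -> detection is skipped with a warning.
--     """
--     label_lower = raw_label.lower().strip()
--
--     # 1. Exact match
--     for key, class_id in class_mapping.items():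
--         if key.lower() == label_lower:
--             return class_id
--
--     # 2. Substring match
--     for key, class_id in class_mapping.items():
--         if key.lower() in label_lower or label_lower in key.lower():
--             return class_id
--
--     return None
-- ===== SOURCE B (Python) =====
-- def match_label_to_class(
--     raw_label:     str,
--     class_mapping: dict[str, int],
-- ) -> int | None:
--     """Single pass: exact match returns immediately; the first substring
--     match is remembered as a fallback and returned only after the whole
--     mapping has been scanned without an exact match."""
--     label_lower = raw_label.lower().strip()
--     fallback = None
--     for key, class_id in class_mapping.items():
--         kl = key.lower()
--         if kl == label_lower:
--             return class_id
--         if fallback is None and (kl in label_lower or label_lower in kl):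
--             fallback = class_id
--     return fallback
-- ===== Notes on version B (the rewrite author's own statement) =====
-- stated objective: simpler
-- what changed: Replaces A's two full passes over the mapping (exact-match scan, then substring scan) by one pass that returns an exact match immediately and remembers the first substring match as a fallback returned after the loop.
import Mathlib
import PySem

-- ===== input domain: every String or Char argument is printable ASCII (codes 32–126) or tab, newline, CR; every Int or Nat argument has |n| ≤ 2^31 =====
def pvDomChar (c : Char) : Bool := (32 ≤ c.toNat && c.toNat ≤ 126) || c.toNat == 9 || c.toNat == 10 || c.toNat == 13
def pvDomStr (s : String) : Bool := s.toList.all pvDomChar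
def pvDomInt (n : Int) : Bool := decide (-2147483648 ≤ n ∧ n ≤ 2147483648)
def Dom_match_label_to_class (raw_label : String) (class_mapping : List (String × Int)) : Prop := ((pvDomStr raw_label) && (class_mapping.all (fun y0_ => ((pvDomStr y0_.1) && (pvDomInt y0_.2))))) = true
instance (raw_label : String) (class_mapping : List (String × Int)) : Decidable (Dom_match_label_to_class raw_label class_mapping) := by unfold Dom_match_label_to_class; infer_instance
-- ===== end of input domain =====

-- B replaces A's two passes over the mapping by one pass with a substring fallback; objective: simpler.

-- ===== PORT A =====
-- first loop of A: exact case-insensitive match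
def mlcExact (ll : String) : List (String × Int) → Option Int
  | [] => none
  | (key, class_id) :: rest =>
      if PySem.Str.lower key == ll then some class_id else mlcExact ll rest

-- second loop of A: substring match
def mlcSub (ll : String) : List (String × Int) → Option Int
  | [] => none
  | (key, class_id) :: rest =>
      if PySem.Str.isIn (PySem.Str.lower key) ll || PySem.Str.isIn ll (PySem.Str.lower key) then
        some class_id
      else mlcSub ll rest

def match_label_to_class (raw_label : String) (class_mapping : List (String × Int)) : Option Int :=
  let label_lower := PySem.Str.strip (PySem.Str.lower raw_label)
  match mlcExact label_lower class_mapping with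
  | some class_id => some class_id
  | none => mlcSub label_lower class_mapping

-- ===== PORT B =====
-- B's single loop: return on exact match, remember first substring match as fallback
def mlcGo (ll : String) (fb : Option Int) : List (String × Int) → Option Int
  | [] => fb
  | (key, class_id) :: rest =>
      let kl := PySem.Str.lower key
      if kl == ll then some class_id
      else if fb.isNone && (PySem.Str.isIn kl ll || PySem.Str.isIn ll kl) then
        mlcGo ll (some class_id) rest
      else mlcGo ll fb rest

def match_label_to_class_alt (raw_label : String) (class_mapping : List (String × Int)) : Option Int :=
  mlcGo (PySem.Str.strip (PySem.Str.lower raw_label)) none class_mapping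

-- ===== PRECONDITION & SPEC =====
def Spec_match_label_to_class (raw_label : String) (class_mapping : List (String × Int)) (out : Option Int) : Prop := out = match_label_to_class_alt raw_label class_mapping
instance (raw_label : String) (class_mapping : List (String × Int)) (out : Option Int) : Decidable (Spec_match_label_to_class raw_label class_mapping out) := by unfold Spec_match_label_to_class; infer_instance

-- ===== CLAIM (what is proved, stated in full; the proofs are below) =====
def Claim_equal_match_label_to_class : Prop := ∀ (raw_label : String) (class_mapping : List (String × Int)), Dom_match_label_to_class raw_label class_mapping → Spec_match_label_to_class raw_label class_mapping (match_label_to_class raw_label class_mapping)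

-- ===== LEMMAS AND PROOFS =====

-- B's loop returns the first exact match, else the fallback, else the first substring match.
theorem mlcGo_eq (ll : String) (l : List (String × Int)) :
    ∀ fb, mlcGo ll fb l = (mlcExact ll l).or (fb.or (mlcSub ll l)) := by
  induction l with
  | nil => intro fb; simp [mlcGo, mlcExact, mlcSub]
  | cons h rest ih =>
      intro fb
      obtain ⟨key, class_id⟩ := h
      by_cases hx : PySem.Str.lower key == ll
      · simp [mlcGo, mlcExact, hx]
      · by_cases hs : PySem.Chars.isIn (PySem.Chars.lower key.toList) ll.toList = true ∨
                      PySem.Chars.isIn ll.toList (PySem.Chars.lower key.toList) = true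
        · cases fb with
          | none =>
              simp [mlcGo, mlcExact, mlcSub, hx, hs, ih, Option.or]
          | some w =>
              simp [mlcGo, mlcExact, mlcSub, hx, ih, Option.or]
        · simp [mlcGo, mlcExact, mlcSub, hx, hs, ih]

-- ===== VERDICT (by name: the statement is the Claim_ definition above) =====
theorem match_label_to_class_spec : Claim_equal_match_label_to_class := by
  intro raw_label class_mapping _
  unfold Spec_match_label_to_class match_label_to_class match_label_to_class_alt
  rw [mlcGo_eq]
  cases h : mlcExact (PySem.Str.strip (PySem.Str.lower raw_label)) class_mapping <;> simp [h]
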